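-- pv_equiv track=rewrite | github.com/yh2072/edgameclaw | generator/assembler.py | _find_script_and_offset
-- ===== SOURCE A (Python) =====
-- def _find_script_and_offset(scripts: list[str], lines: list[str], combined_line_idx: int):
--     """Map a 0-based line index in the combined JS back to (script_index, line_within_script)."""
--     offset = 0
--     for si, script in enumerate(scripts):
--         if not script.strip():
--             continue
--         script_lines = script.split('\n')
--         # +1 for the `;\n` separator between scripts (except the first)
--         block_len = len(script_lines) + (1 if si > 0 else 0)
--         if combined_line_idx < offset + len(script_lines) + (1 if si > 0 else 0):
--             local_idx = combined_line_idx - offset - (1 if si > 0 else 0)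
--             return si, max(0, local_idx), script
--         offset += block_len
--     return None, None, None
-- ===== SOURCE B (Python) =====
-- def _bisect_right(a, x):
--     lo, hi = 0, len(a)
--     while lo < hi:
--         mid = (lo + hi) // 2
--         if x < a[mid]:
--             hi = mid
--         else:
--             lo = mid + 1
--     return lo
--
--
-- def _find_script_and_offset(scripts: list[str], lines: list[str], combined_line_idx: int):
--     """Map a 0-based line index in the combined JS back to (script_index, line_within_script)."""
--     # First pass: index table of (original si, start offset, script) for non-blank
--     # scripts, plus the list of cumulative END offsets of their blocks.
--     entries = []
--     ends = []
--     offset = 0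
--     for si, script in enumerate(scripts):
--         if not script.strip():
--             continue
--         block_len = len(script.split('\n')) + (1 if si > 0 else 0)
--         entries.append((si, offset, script))
--         offset += block_len
--         ends.append(offset)
--     # Binary search: first block whose end offset exceeds combined_line_idx.
--     k = _bisect_right(ends, combined_line_idx)
--     if k == len(entries):
--         return None, None, None
--     si, start, script = entries[k]
--     return si, max(0, combined_line_idx - start - (1 if si > 0 else 0)), script
-- ===== Notes on version B (the rewrite author's own statement) =====
-- stated objective: alternative
-- what changed: Replaces A's single accumulating scan with early exit by a two-phase scheme: one pass builds an index table of (script index, start offset, script) with cumulative end offsets, then a hand-written binary search (bisect_right) locates the block containing the line index.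
import Mathlib
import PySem

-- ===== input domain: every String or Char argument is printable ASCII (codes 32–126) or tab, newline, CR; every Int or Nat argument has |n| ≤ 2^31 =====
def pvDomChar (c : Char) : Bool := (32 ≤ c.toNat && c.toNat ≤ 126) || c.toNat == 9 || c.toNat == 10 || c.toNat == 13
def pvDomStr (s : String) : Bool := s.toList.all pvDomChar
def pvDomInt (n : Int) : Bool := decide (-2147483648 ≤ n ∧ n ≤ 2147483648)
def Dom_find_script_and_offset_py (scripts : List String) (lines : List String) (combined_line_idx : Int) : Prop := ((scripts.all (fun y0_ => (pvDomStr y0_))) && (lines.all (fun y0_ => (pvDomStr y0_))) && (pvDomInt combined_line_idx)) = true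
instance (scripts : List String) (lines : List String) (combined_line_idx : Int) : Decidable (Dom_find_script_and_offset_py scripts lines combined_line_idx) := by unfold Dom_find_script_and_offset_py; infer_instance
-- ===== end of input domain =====

-- B replaces A's accumulating early-exit scan by an index-table build plus a binary search; alternative decomposition, same results.

-- ===== PORT A =====
-- A's enumerate loop with running `offset`, in iteration order; early return on the hit block.
def fsoA (idx : Int) : List String → Nat → Int → Option Int × Option Int × Option String
  | [], _, _ => (none, none, none)
  | s :: rest, si, offset =>
    if PySem.Str.strip s = "" then
      fsoA idx rest (si + 1) offset
    else
      let scriptLines := PySem.Chars.splitOn s.toList "\n".toList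
      let blockLen : Int := (scriptLines.length : Int) + (if si > 0 then 1 else 0)
      if idx < offset + (scriptLines.length : Int) + (if si > 0 then 1 else 0) then
        (some (si : Int), some (max 0 (idx - offset - (if si > 0 then 1 else 0))), some s)
      else
        fsoA idx rest (si + 1) (offset + blockLen)

def find_script_and_offset_py (scripts : List String) (lines : List String) (combined_line_idx : Int) : Option Int × Option Int × Option String :=
  fsoA combined_line_idx scripts 0 0

-- ===== PORT B =====
-- Source B's first pass: entries (si, start, script) and cumulative end offsets, both in append order.
def fsoBuild : List String → Nat → Int → List (Nat × Int × String) × List Int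
  | [], _, _ => ([], [])
  | s :: rest, si, offset =>
    if PySem.Str.strip s = "" then
      fsoBuild rest (si + 1) offset
    else
      let blockLen : Int := ((PySem.Chars.splitOn s.toList "\n".toList).length : Int) + (if si > 0 then 1 else 0)
      let (es, ends) := fsoBuild rest (si + 1) (offset + blockLen)
      ((si, offset, s) :: es, (offset + blockLen) :: ends)

-- Source B's _bisect_right while-loop; the extra fuel argument (initially hi - lo, which strictly
-- decreases each iteration) only makes the same computation total — a[mid] is always in range
-- when lo < hi ≤ len a, so getD's default is unreachable.
def fsoBisect (a : List Int) (x : Int) : Nat → Nat → Nat → Nat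
  | 0, lo, _hi => lo
  | fuel + 1, lo, hi =>
    if lo < hi then
      let mid := (lo + hi) / 2
      if x < a.getD mid 0 then fsoBisect a x fuel lo mid else fsoBisect a x fuel (mid + 1) hi
    else lo

def find_script_and_offset_py_alt (scripts : List String) (lines : List String) (combined_line_idx : Int) : Option Int × Option Int × Option String :=
  let p := fsoBuild scripts 0 0
  let entries := p.1
  let ends := p.2
  let k := fsoBisect ends combined_line_idx (ends.length - 0) 0 ends.length
  if k = entries.length then
    (none, none, none)
  else
    -- entries[k]: k < len entries here, so getD's default is unreachable
    let e := entries.getD k (0, 0, "")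
    (some (e.1 : Int), some (max 0 (combined_line_idx - e.2.1 - (if e.1 > 0 then 1 else 0))), some e.2.2)

-- ===== PRECONDITION & SPEC =====
def Spec_find_script_and_offset_py (scripts : List String) (lines : List String) (combined_line_idx : Int) (out : Option Int × Option Int × Option String) : Prop := out = find_script_and_offset_py_alt scripts lines combined_line_idx
instance (scripts : List String) (lines : List String) (combined_line_idx : Int) (out : Option Int × Option Int × Option String) : Decidable (Spec_find_script_and_offset_py scripts lines combined_line_idx out) := by unfold Spec_find_script_and_offset_py; infer_instance

-- ===== CLAIM (what is proved, stated in full; the proofs are below) =====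
def Claim_equal_find_script_and_offset_py : Prop := ∀ (scripts : List String) (lines : List String) (combined_line_idx : Int), Dom_find_script_and_offset_py scripts lines combined_line_idx → Spec_find_script_and_offset_py scripts lines combined_line_idx (find_script_and_offset_py scripts lines combined_line_idx)

-- ===== LEMMAS AND PROOFS =====

-- splitOn never returns the empty list (Python s.split(sep) has at least one piece)
lemma fsoSplitOn_go_ne_nil (sep : List Char) : ∀ (fuel : Nat) (l cur : List Char) (acc : List (List Char)),
    PySem.Chars.splitOn.go sep fuel l cur acc ≠ [] := by
  intro fuel
  induction fuel with
  | zero => intro l cur acc; simp [PySem.Chars.splitOn.go]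
  | succ n ih =>
    intro l cur acc
    cases l with
    | nil => simp [PySem.Chars.splitOn.go]
    | cons c rest =>
      rw [PySem.Chars.splitOn.go]
      split
      · exact ih _ _ _
      · exact ih _ _ _

lemma fsoSplitOn_ne_nil (cs : List Char) : PySem.Chars.splitOn cs "\n".toList ≠ [] := by
  unfold PySem.Chars.splitOn
  exact fsoSplitOn_go_ne_nil _ _ _ _ _

-- the linear specification of bisect_right: first index whose element exceeds x
def fsoLin (x : Int) : List Int → Nat
  | [] => 0
  | e :: t => if x < e then 0 else fsoLin x t + 1

lemma fsoLin_le_length (x : Int) (a : List Int) : fsoLin x a ≤ a.length := by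
  induction a with
  | nil => simp [fsoLin]
  | cons e t ih => simp only [fsoLin, List.length_cons]; split <;> omega

lemma fsoLin_prefix (x : Int) (a : List Int) : ∀ i < fsoLin x a, a.getD i 0 ≤ x := by
  induction a with
  | nil => simp [fsoLin]
  | cons e t ih =>
    intro i hi
    simp only [fsoLin] at hi
    split at hi
    · omega
    · cases i with
      | zero => simpa using le_of_not_gt ‹¬ x < e›
      | succ j => simpa using ih j (by omega)

lemma fsoLin_suffix (x : Int) (a : List Int) (hs : a.Pairwise (· ≤ ·)) :
    ∀ i, fsoLin x a ≤ i → i < a.length → x < a.getD i 0 := by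
  induction a with
  | nil => simp
  | cons e t ih =>
    intro i hi hil
    rcases List.pairwise_cons.mp hs with ⟨he, ht⟩
    simp only [fsoLin] at hi
    split at hi
    · cases i with
      | zero => simpa using ‹x < e›
      | succ j =>
        have hjl : j < t.length := by simpa using hil
        have hj : t.getD j 0 ∈ t := by
          rw [List.getD_eq_getElem?_getD, List.getElem?_eq_getElem hjl]
          exact List.getElem_mem hjl
        have := he _ hj
        simp only [List.getD_cons_succ]
        calc x < e := ‹x < e›
          _ ≤ t.getD j 0 := this
    · cases i with
      | zero => omega
      | succ j => simpa using ih ht j (by omega) (by simpa using hil)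

lemma fsoBisect_eq (a : List Int) (x : Int) (hs : a.Pairwise (· ≤ ·)) :
    ∀ fuel lo hi, hi - lo ≤ fuel → hi ≤ a.length → lo ≤ fsoLin x a → fsoLin x a ≤ hi →
      fsoBisect a x fuel lo hi = fsoLin x a := by
  intro fuel
  induction fuel with
  | zero =>
    intro lo hi hf hha hlo hhi
    simp only [fsoBisect]
    omega
  | succ n ih =>
    intro lo hi hf hha hlo hhi
    simp only [fsoBisect]
    split
    · rename_i hlt
      set mid := (lo + hi) / 2 with hmid
      have hmlt : mid < hi := by omega
      have hmge : lo ≤ mid := by omega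
      by_cases hc : x < a.getD mid 0
      · simp only [hc, if_true]
        have hle : fsoLin x a ≤ mid := by
          by_contra hgt
          exact absurd hc (not_lt.mpr (fsoLin_prefix x a mid (by omega)))
        exact ih lo mid (by omega) (by omega) hlo hle
      · simp only [hc, if_false]
        have hgt : mid + 1 ≤ fsoLin x a := by
          by_contra h
          exact hc (fsoLin_suffix x a hs mid (by omega) (by omega))
        exact ih (mid + 1) hi (by omega) hha hgt hhi
    · omega

-- the ends list fsoBuild produces is strictly above `offset` and sorted
lemma fsoBuild_ends_bounds (scripts : List String) : ∀ (si : Nat) (offset : Int),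
    (∀ e ∈ (fsoBuild scripts si offset).2, offset < e) ∧
      (fsoBuild scripts si offset).2.Pairwise (· ≤ ·) := by
  induction scripts with
  | nil => intro si offset; simp [fsoBuild]
  | cons s rest ih =>
    intro si offset
    simp only [fsoBuild]
    split
    · exact ih (si + 1) offset
    · have h1 : (1 : Int) ≤ ((PySem.Chars.splitOn s.toList "\n".toList).length : Int) := by
        have h := fsoSplitOn_ne_nil s.toList
        have : 0 < (PySem.Chars.splitOn s.toList "\n".toList).length := List.length_pos_iff.mpr h
        exact_mod_cast this
      set bl : Int := ((PySem.Chars.splitOn s.toList "\n".toList).length : Int) + (if si > 0 then 1 else 0) with hbl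
      have hbl1 : 1 ≤ bl := by rw [hbl]; split <;> omega
      obtain ⟨hmem, hpw⟩ := ih (si + 1) (offset + bl)
      constructor
      · intro e he
        simp only [List.mem_cons] at he
        rcases he with rfl | he
        · omega
        · have := hmem e he; omega
      · exact List.pairwise_cons.mpr ⟨fun e he => le_of_lt (hmem e he), hpw⟩

-- A's scan equals the table lookup at the linear index
lemma fsoA_eq_lin (idx : Int) (scripts : List String) : ∀ (si : Nat) (offset : Int),
    fsoA idx scripts si offset =
      (let p := fsoBuild scripts si offset
       let k := fsoLin idx p.2
       if k = p.1.length then (none, none, none)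
       else
         let e := p.1.getD k (0, 0, "")
         (some (e.1 : Int), some (max 0 (idx - e.2.1 - (if e.1 > 0 then 1 else 0))), some e.2.2)) := by
  induction scripts with
  | nil => intro si offset; simp [fsoA, fsoBuild, fsoLin]
  | cons s rest ih =>
    intro si offset
    simp only [fsoA, fsoBuild]
    split
    · exact ih (si + 1) offset
    · set bl : Int := ((PySem.Chars.splitOn s.toList "\n".toList).length : Int) + (if si > 0 then 1 else 0) with hbl
      by_cases hc : idx < offset + ((PySem.Chars.splitOn s.toList "\n".toList).length : Int) + (if si > 0 then 1 else 0)
      · have hc' : idx < offset + bl := by rw [hbl]; omega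
        simp only [hc, if_true, fsoLin, hc', List.length_cons]
        simp
      · have hc' : ¬ idx < offset + bl := by rw [hbl]; omega
        simp only [hc, if_false]
        rw [ih (si + 1) (offset + bl)]
        simp only [fsoLin, hc', if_false, List.length_cons]
        have : fsoLin idx (fsoBuild rest (si + 1) (offset + bl)).2 + 1 =
            (fsoBuild rest (si + 1) (offset + bl)).1.length + 1 ↔
            fsoLin idx (fsoBuild rest (si + 1) (offset + bl)).2 =
            (fsoBuild rest (si + 1) (offset + bl)).1.length := by omega
        split
        · rename_i h; simp [this.mp (by omega)]
        · rename_i h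
          have hne : ¬ fsoLin idx (fsoBuild rest (si + 1) (offset + bl)).2 =
              (fsoBuild rest (si + 1) (offset + bl)).1.length := fun hh => h (by omega)
          simp [hne]

-- ===== VERDICT (by name: the statement is the Claim_ definition above) =====
theorem find_script_and_offset_py_spec : Claim_equal_find_script_and_offset_py := by
  intro scripts lines idx _
  unfold Spec_find_script_and_offset_py find_script_and_offset_py find_script_and_offset_py_alt
  dsimp only
  obtain ⟨_, hpw⟩ := fsoBuild_ends_bounds scripts 0 0
  rw [fsoBisect_eq _ idx hpw _ 0 _ (by omega) le_rfl (Nat.zero_le _) (fsoLin_le_length _ _)]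
  exact fsoA_eq_lin idx scripts 0 0
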